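-- pv_equiv track=rewrite | github.com/CarstenWalther/space-tyckiting | clients/python/tyckiting_client/hexagon.py | get_ring
-- ===== SOURCE A (Python) =====
-- DIRECTIONS = [
-- 	( 1, 0),
-- 	( 1,-1),
-- 	( 0,-1),
-- 	(-1, 0),
-- 	(-1, 1),
-- 	( 0, 1)
-- ]
--
-- def cube_add(coords, direction):
-- 	return (coords[0] + direction[0], coords[1] + direction[1])
--
-- def neighbor(coords, direction):
-- 	return cube_add(coords, DIRECTIONS[direction])
--
-- def get_ring(coords=(0,0), radius=1):
-- 	if radius == 0:
-- 		return set([coords])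
-- 	results = set()
-- 	cube = cube_add(coords, (-radius, radius))
-- 	for i in range(6):
-- 		for _ in range(radius):
-- 			results.add(cube)
-- 			cube = neighbor(cube, i)
-- 	return results
-- ===== SOURCE B (Python) =====
-- DIRECTIONS = [
-- 	( 1, 0),
-- 	( 1,-1),
-- 	( 0,-1),
-- 	(-1, 0),
-- 	(-1, 1),
-- 	( 0, 1)
-- ]
--
-- def get_ring(coords=(0,0), radius=1):
-- 	# Closed form: cell k of side i is corner_i + k*DIRECTIONS[i],
-- 	# where corner_i = coords + radius*DIRECTIONS[(i+4) % 6].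
-- 	if radius <= 0:
-- 		return set() if radius < 0 else {coords}
-- 	x, y = coords
-- 	return {
-- 		(x + radius * DIRECTIONS[(i + 4) % 6][0] + k * DIRECTIONS[i][0],
-- 		 y + radius * DIRECTIONS[(i + 4) % 6][1] + k * DIRECTIONS[i][1])
-- 		for i in range(6) for k in range(radius)
-- 	}
-- ===== Notes on version B (the rewrite author's own statement) =====
-- stated objective: alternative
-- what changed: B computes each ring cell in closed form (corner_i = coords + radius*DIRECTIONS[(i+4)%6], cell = corner_i + k*DIRECTIONS[i]) in a single set comprehension, replacing A's stateful perimeter walk that mutates a running cube through 6*radius neighbor steps.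
import Mathlib
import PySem

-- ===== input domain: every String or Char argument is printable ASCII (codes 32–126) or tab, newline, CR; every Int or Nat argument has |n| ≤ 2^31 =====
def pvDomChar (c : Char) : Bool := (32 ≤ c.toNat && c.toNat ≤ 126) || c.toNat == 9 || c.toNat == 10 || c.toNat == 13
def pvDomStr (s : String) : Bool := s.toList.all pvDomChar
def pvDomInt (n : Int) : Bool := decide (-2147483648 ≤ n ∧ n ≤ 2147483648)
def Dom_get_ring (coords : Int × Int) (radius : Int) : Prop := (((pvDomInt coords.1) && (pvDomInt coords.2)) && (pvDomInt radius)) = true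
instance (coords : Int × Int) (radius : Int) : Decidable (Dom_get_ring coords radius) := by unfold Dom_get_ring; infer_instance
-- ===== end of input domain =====

-- B replaces A's stateful six-direction perimeter walk with a closed-form set
-- comprehension (corner arithmetic); same values, a different decomposition.

-- ===== PORT A =====
def pvDIRECTIONS : List (Int × Int) := [(1, 0), (1, -1), (0, -1), (-1, 0), (-1, 1), (0, 1)]

def pvCubeAdd (c d : Int × Int) : Int × Int := (c.1 + d.1, c.2 + d.2)

-- DIRECTIONS[direction]; in A the index is always 0..5, so the .getD default never fires
def pvDir (i : Int) : Int × Int := (PySem.List.pyGet? pvDIRECTIONS i).getD (0, 0)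

def pvNeighbor (c : Int × Int) (i : Int) : Int × Int := pvCubeAdd c (pvDir i)

def get_ring (coords : Int × Int) (radius : Int) : List (Int × Int) :=
  if radius = 0 then PySem.Set.ofList [coords]
  else
    ((PySem.List.pyRange 0 6 1).foldl
      (fun (st : PySem.Set (Int × Int) × (Int × Int)) i =>
        (PySem.List.pyRange 0 radius 1).foldl
          (fun st _ => (PySem.Set.add st.1 st.2, pvNeighbor st.2 i)) st)
      (PySem.Set.empty, pvCubeAdd coords (-radius, radius))).1

-- ===== PORT B =====
-- B's DIRECTIONS[(i+4)%6] and DIRECTIONS[i]: indices always land in 0..5, default never fires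
def get_ring_alt (coords : Int × Int) (radius : Int) : List (Int × Int) :=
  if radius ≤ 0 then (if radius < 0 then [] else [coords])
  else
    PySem.Set.ofList
      ((PySem.List.pyRange 0 6 1).flatMap (fun i =>
        (PySem.List.pyRange 0 radius 1).map (fun k =>
          (coords.1 + radius * (pvDir (PySem.Int.mod (i + 4) 6)).1 + k * (pvDir i).1,
           coords.2 + radius * (pvDir (PySem.Int.mod (i + 4) 6)).2 + k * (pvDir i).2))))

-- ===== PRECONDITION & SPEC =====
def Spec_get_ring (coords : Int × Int) (radius : Int) (out : List (Int × Int)) : Prop := out = get_ring_alt coords radius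
instance (coords : Int × Int) (radius : Int) (out : List (Int × Int)) : Decidable (Spec_get_ring coords radius out) := by unfold Spec_get_ring; infer_instance

-- ===== CLAIM (what is proved, stated in full; the proofs are below) =====
def Claim_equal_get_ring : Prop := ∀ (coords : Int × Int) (radius : Int), Dom_get_ring coords radius → Spec_get_ring coords radius (get_ring coords radius)

-- ===== LEMMAS AND PROOFS =====

-- side i of the ring, as the list of cells corner + k*d for k < n
def pvSeg (c d : Int × Int) (n : Nat) : List (Int × Int) :=
  (List.range n).map (fun k : Nat => (c.1 + (k : Int) * d.1, c.2 + (k : Int) * d.2))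

lemma pvSeg_succ (c d : Int × Int) (n : Nat) :
    pvSeg c d (n + 1) = c :: pvSeg (c.1 + d.1, c.2 + d.2) d n := by
  unfold pvSeg
  rw [List.range_succ_eq_map, List.map_cons, List.map_map]
  congr 1
  · simp
  · apply List.map_congr_left
    intro k _
    simp only [Function.comp_apply, Prod.mk.injEq]
    push_cast
    constructor <;> ring

lemma pvSideLoop (i : Int) (l : List Int) (S : PySem.Set (Int × Int)) (c : Int × Int) :
    l.foldl (fun st _ => (PySem.Set.add st.1 st.2, pvNeighbor st.2 i)) (S, c)
    = (PySem.Set.update S (pvSeg c (pvDir i) l.length),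
       (c.1 + (l.length : Int) * (pvDir i).1, c.2 + (l.length : Int) * (pvDir i).2)) := by
  induction l generalizing S c with
  | nil => simp [pvSeg, PySem.Set.update]
  | cons x xs ih =>
    rw [List.foldl_cons, ih, List.length_cons]
    refine Prod.ext ?_ ?_
    · show PySem.Set.update _ _ = PySem.Set.update S (pvSeg c (pvDir i) (xs.length + 1))
      rw [pvSeg_succ, PySem.Set.update_cons]
      rfl
    · show (_, _) = (_, _)
      simp only [pvNeighbor, pvCubeAdd, Prod.mk.injEq]
      push_cast
      constructor <;> ring

-- ===== VERDICT (by name: the statement is the Claim_ definition above) =====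
theorem get_ring_spec : Claim_equal_get_ring := by
  intro coords radius _
  unfold Spec_get_ring get_ring get_ring_alt
  rcases lt_trichotomy radius 0 with hneg | hzero | hpos
  · -- negative radius: A's inner range is empty, so the fold leaves the empty set
    rw [if_neg (by omega), if_pos (by omega), if_pos hneg]
    rw [PySem.List.pyRange_one_eq_nil (by omega)]
    simp [PySem.Set.empty]
  · subst hzero
    simp only [le_refl, lt_irrefl, if_false, if_pos]
    rfl
  · rw [if_neg (by omega), if_neg (by omega)]
    have h6 : PySem.List.pyRange 0 6 1 = [0, 1, 2, 3, 4, 5] := by decide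
    have hr : PySem.List.pyRange 0 radius 1
        = (List.range radius.toNat).map (fun k : Nat => ((k : Int))) := by
      simpa using PySem.List.pyRange_one 0 radius
    have hlen : (PySem.List.pyRange 0 radius 1).length = radius.toNat := by
      simp [hr]
    have hcast : (radius.toNat : Int) = radius := Int.toNat_of_nonneg (by omega)
    have hB : ∀ (cx cy dx dy : Int),
        (PySem.List.pyRange 0 radius 1).map (fun k => (cx + k * dx, cy + k * dy))
        = pvSeg (cx, cy) (dx, dy) radius.toNat := by
      intro cx cy dx dy
      rw [hr, List.map_map]
      simp only [pvSeg]
      apply List.map_congr_left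
      intro k _
      rfl
    have e0 : pvDir 0 = (1, 0) := by decide
    have e1 : pvDir 1 = (1, -1) := by decide
    have e2 : pvDir 2 = (0, -1) := by decide
    have e3 : pvDir 3 = (-1, 0) := by decide
    have e4 : pvDir 4 = (-1, 1) := by decide
    have e5 : pvDir 5 = (0, 1) := by decide
    have m0 : pvDir (PySem.Int.mod (0 + 4) 6) = (-1, 1) := by decide
    have m1 : pvDir (PySem.Int.mod (1 + 4) 6) = (0, 1) := by decide
    have m2 : pvDir (PySem.Int.mod (2 + 4) 6) = (1, 0) := by decide
    have m3 : pvDir (PySem.Int.mod (3 + 4) 6) = (1, -1) := by decide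
    have m4 : pvDir (PySem.Int.mod (4 + 4) 6) = (0, -1) := by decide
    have m5 : pvDir (PySem.Int.mod (5 + 4) 6) = (-1, 0) := by decide
    rw [h6]
    simp only [List.foldl_cons, List.foldl_nil, pvSideLoop, hlen, hcast,
      List.flatMap_cons, List.flatMap_nil, List.append_nil,
      e0, e1, e2, e3, e4, e5, m0, m1, m2, m3, m4, m5, hB, pvCubeAdd,
      ← PySem.Set.update_nil_left, ← PySem.Set.update_append, PySem.Set.empty]
    norm_num
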